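-- pv_equiv track=rewrite | github.com/abelaba/competitive-programming | daily/2380. Time Needed to Rearrange a Binary String.py | secondsToRemoveOccurrences
-- ===== SOURCE A (Python) =====
-- def secondsToRemoveOccurrences(s: str) -> int:
--
--     s = list(s)
--
--     totalCount = 0
--
--     count = 1
--
--     while count != 0:
--
--         count = 0
--         i = 0
--
--         while i < len(s)-1:
--             if s[i] == '0' and s[i+1] == '1':
--                 count += 1
--                 s[i], s[i+1] = s[i+1], s[i]
--                 i+=2
--             else:
--                 i+= 1
--
--         if count != 0:
--             totalCount += 1
--
--
--
--     return totalCount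
-- ===== SOURCE B (Python) =====
-- def secondsToRemoveOccurrences(s: str) -> int:
--     # One pass: per maximal block of 0/1 characters, each '1' seen after z>0 zeros
--     # finishes at time max(prev_finish + 1, z); answer is the max over all blocks.
--     zeros = cur = best = 0
--     for ch in s:
--         if ch == '0':
--             zeros += 1
--         elif ch == '1':
--             if zeros:
--                 cur = max(cur + 1, zeros)
--                 if cur > best:
--                     best = cur
--         else:
--             zeros = cur = 0
--     return best
-- ===== Notes on version B (the rewrite author's own statement) =====
-- stated objective: faster
-- what changed: Replaces A's repeated full swap-simulation passes over the string (one pass per second until a fixpoint) with a single left-to-right pass computing the answer in closed form: per maximal zero/one block it tracks the zeros seen and updates the finish time to max(prev+1, zeros) at each one-digit, taking the maximum over blocks.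
import Mathlib
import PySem

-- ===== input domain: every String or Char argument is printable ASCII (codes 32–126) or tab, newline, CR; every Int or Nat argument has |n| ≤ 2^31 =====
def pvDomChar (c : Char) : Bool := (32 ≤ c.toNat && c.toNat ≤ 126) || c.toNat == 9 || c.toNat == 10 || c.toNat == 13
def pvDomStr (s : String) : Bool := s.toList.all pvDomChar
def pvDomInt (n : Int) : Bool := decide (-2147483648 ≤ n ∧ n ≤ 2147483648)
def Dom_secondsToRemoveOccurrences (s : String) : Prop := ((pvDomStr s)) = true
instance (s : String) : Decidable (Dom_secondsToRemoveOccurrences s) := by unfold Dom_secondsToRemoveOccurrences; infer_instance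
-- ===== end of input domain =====

-- B replaces A's repeated swap passes by a single left-to-right pass computing the answer
-- in closed form; equivalence is about the return value (A mutates only a local copy of s).

-- ===== PORT A =====
-- A's inner while loop over index i with the i+=2 skip after a swap, transcribed as the
-- obvious structural recursion on the suffix of the list from position i on; it returns
-- the rewritten list and this pass's swap count.
def pvPassA : List Char → List Char × Nat
  | a :: b :: r =>
    if a = '0' ∧ b = '1' then
      let p := pvPassA r
      ('1' :: '0' :: p.1, p.2 + 1)
    else
      let p := pvPassA (b :: r)
      (a :: p.1, p.2)
  | l => (l, 0)

-- Termination measure for A's outer while loop (cited only by the port's decreasing_by):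
-- total number of '0's standing before each '1' inside its block.
def pvMuA : Nat → List Char → Nat
  | _, [] => 0
  | z, c :: r => if c = '0' then pvMuA (z + 1) r else if c = '1' then z + pvMuA z r else pvMuA 0 r

theorem pvMuA_cons (z : Nat) (c : Char) (r : List Char) :
    pvMuA z (c :: r) = if c = '0' then pvMuA (z + 1) r
      else if c = '1' then z + pvMuA z r else pvMuA 0 r := rfl

theorem pvMuA_pass (l : List Char) : ∀ z : Nat, pvMuA z (pvPassA l).1 + (pvPassA l).2 = pvMuA z l := by
  induction l using pvPassA.induct with
  | case1 a b r h ih =>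
    intro z
    obtain ⟨ha, hb⟩ := h
    subst ha hb
    simp only [pvPassA, and_self, reduceIte]
    simp only [pvMuA_cons, Char.reduceEq, reduceIte]
    have := ih (z + 1)
    omega
  | case2 a b r h ih =>
    intro z
    simp only [pvPassA, if_neg h]
    rw [pvMuA_cons, pvMuA_cons]
    rcases Decidable.em (a = '0') with h0 | h0
    · simp only [if_pos h0]; exact ih (z + 1)
    · rcases Decidable.em (a = '1') with h1 | h1
      · simp only [if_neg h0, if_pos h1]
        have := ih z; omega
      · simp only [if_neg h0, if_neg h1]; exact ih 0
  | case3 l h =>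
    intro z
    match l, h with
    | [], _ => simp [pvPassA, pvMuA]
    | [c], _ => simp [pvPassA]
    | a :: b :: r, h => exact (h a b r rfl).elim

-- A's outer while loop: repeat the pass, adding 1 to totalCount whenever a pass swapped.
def pvOuterA (l : List Char) : Int :=
  if h : (pvPassA l).2 = 0 then 0 else 1 + pvOuterA (pvPassA l).1
termination_by pvMuA 0 l
decreasing_by
  have := pvMuA_pass l 0
  omega

def secondsToRemoveOccurrences (s : String) : Int := pvOuterA s.toList

-- ===== PORT B =====
-- One fold step: state = (zeros in current block, current finish time, best so far).
def pvStepB (st : Nat × Nat × Nat) (ch : Char) : Nat × Nat × Nat :=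
  if ch = '0' then (st.1 + 1, st.2.1, st.2.2)
  else if ch = '1' then
    if st.1 = 0 then st
    else
      let c := max (st.2.1 + 1) st.1
      (st.1, c, max st.2.2 c)
  else (0, 0, st.2.2)

def secondsToRemoveOccurrences_alt (s : String) : Int :=
  ((s.toList.foldl pvStepB (0, 0, 0)).2.2 : Int)

-- ===== PRECONDITION & SPEC =====
def Spec_secondsToRemoveOccurrences (s : String) (out : Int) : Prop := out = secondsToRemoveOccurrences_alt s
instance (s : String) (out : Int) : Decidable (Spec_secondsToRemoveOccurrences s out) := by unfold Spec_secondsToRemoveOccurrences; infer_instance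

-- ===== CLAIM (what is proved, stated in full; the proofs are below) =====
def Claim_equal_secondsToRemoveOccurrences : Prop := ∀ (s : String), Dom_secondsToRemoveOccurrences s → Spec_secondsToRemoveOccurrences s (secondsToRemoveOccurrences s)

-- ===== LEMMAS AND PROOFS =====

-- equation lemmas for pvPassA
theorem pvPassA_swap (r : List Char) :
    pvPassA ('0' :: '1' :: r) = ('1' :: '0' :: (pvPassA r).1, (pvPassA r).2 + 1) := by
  simp [pvPassA]

theorem pvPassA_nonswap (a b : Char) (r : List Char) (h : ¬(a = '0' ∧ b = '1')) :
    pvPassA (a :: b :: r) = (a :: (pvPassA (b :: r)).1, (pvPassA (b :: r)).2) := by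
  simp [pvPassA, h]

-- evaluation lemmas for pvStepB
theorem pvStepB_zero (st : Nat × Nat × Nat) : pvStepB st '0' = (st.1 + 1, st.2.1, st.2.2) := by
  simp [pvStepB]

theorem pvStepB_one (st : Nat × Nat × Nat) :
    pvStepB st '1' = if st.1 = 0 then st
      else (st.1, max (st.2.1 + 1) st.1, max st.2.2 (max (st.2.1 + 1) st.1)) := by
  simp [pvStepB]

theorem pvStepB_other (c : Char) (h0 : c ≠ '0') (h1 : c ≠ '1') (st : Nat × Nat × Nat) :
    pvStepB st c = (0, 0, st.2.2) := by
  simp [pvStepB, h0, h1]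

-- best only grows along the fold
theorem pvB_mono (l : List Char) : ∀ st : Nat × Nat × Nat,
    st.2.2 ≤ (List.foldl pvStepB st l).2.2 := by
  induction l with
  | nil => intro st; simp
  | cons c r ih =>
    intro st
    refine le_trans ?_ (ih (pvStepB st c))
    unfold pvStepB
    split_ifs <;> simp

-- a pass with at least one swap forces a positive answer
theorem pvB_pos (l : List Char) (hc : (pvPassA l).2 ≠ 0) :
    ∀ st : Nat × Nat × Nat, 1 ≤ (List.foldl pvStepB st l).2.2 := by
  induction l using pvPassA.induct with
  | case1 a b r h ih =>
    intro st
    obtain ⟨ha, hb⟩ := h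
    subst ha hb
    rw [List.foldl_cons, List.foldl_cons]
    refine le_trans ?_ (pvB_mono r _)
    rw [pvStepB_zero, pvStepB_one]
    simp
  | case2 a b r h ih =>
    intro st
    rw [pvPassA_nonswap a b r h] at hc
    simp only [] at hc
    rw [List.foldl_cons]
    exact ih hc _
  | case3 l h =>
    exfalso
    apply hc
    match l, h with
    | [], _ => simp [pvPassA]
    | [c], _ => simp [pvPassA]
    | a :: b :: r, h => exact (h a b r rfl).elim

-- a pass with no swap means the fold leaves best unchanged,
-- provided no '1' heads l while zeros are pending
theorem pvB_zero (l : List Char) (hc : (pvPassA l).2 = 0) :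
    ∀ z cur best : Nat, (l.head? = some '1' → z = 0) →
      (List.foldl pvStepB (z, cur, best) l).2.2 = best := by
  induction l using pvPassA.induct with
  | case1 a b r h ih =>
    exfalso
    obtain ⟨ha, hb⟩ := h
    subst ha hb
    rw [pvPassA_swap] at hc
    simp at hc
  | case2 a b r h ih =>
    intro z cur best hh
    rw [pvPassA_nonswap a b r h] at hc
    simp only [] at hc
    rw [List.foldl_cons]
    rcases Decidable.em (a = '0') with h0 | h0
    · subst h0
      have hb1 : b ≠ '1' := fun hb => h ⟨rfl, hb⟩
      rw [pvStepB_zero]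
      exact ih hc (z + 1) cur best (by simp [hb1])
    · rcases Decidable.em (a = '1') with h1 | h1
      · subst h1
        have hz : z = 0 := hh (by simp)
        subst hz
        rw [pvStepB_one]
        simp only [reduceIte]
        exact ih hc 0 cur best (by simp)
      · rw [pvStepB_other a h0 h1]
        exact ih hc 0 0 best (by simp)
  | case3 l h =>
    intro z cur best hh
    match l, h with
    | [], _ => rfl
    | [c], _ =>
      rw [List.foldl_cons, List.foldl_nil]
      rcases Decidable.em (c = '0') with h0 | h0
      · subst h0; rw [pvStepB_zero]
      · rcases Decidable.em (c = '1') with h1 | h1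
        · subst h1
          have hz : z = 0 := hh (by simp)
          subst hz
          rw [pvStepB_one]
          simp
        · rw [pvStepB_other c h0 h1]
    | a :: b :: r, h => exact (h a b r rfl).elim

-- key decrement lemma: one pass of A lowers B's fold result by exactly 1,
-- under the loop invariant (z = 0 → cur = 0) ∧ (z ≤ cur ∨ head ≠ '1')
theorem pvB_dec (l : List Char) : ∀ z cur best : Nat,
    (z = 0 → cur = 0) → (z ≤ cur ∨ l.head? ≠ some '1') →
    (List.foldl pvStepB (z, cur - 1, best - 1) (pvPassA l).1).2.2
      = (List.foldl pvStepB (z, cur, best) l).2.2 - 1 := by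
  induction l using pvPassA.induct with
  | case1 a b r h ih =>
    intro z cur best hzc _
    obtain ⟨ha, hb⟩ := h
    subst ha hb
    rw [pvPassA_swap]
    simp only [List.foldl_cons]
    rcases Nat.eq_zero_or_pos z with hz | hz
    · subst hz
      have hcur := hzc rfl; subst hcur
      -- left side: '1' with z = 0 is a no-op, then '0'
      have eL : pvStepB (pvStepB (0, 0 - 1, best - 1) '1') '0' = (1, 0, best - 1) := by
        simp [pvStepB]
      -- right side: '0' then '1' with z = 1
      have eR : pvStepB (pvStepB (0, 0, best) '0') '1' = (1, 1, max best 1) := by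
        simp [pvStepB]
      rw [eL, eR]
      have := ih 1 1 (max best 1) (by omega) (Or.inl (by omega))
      have e1 : (max best 1 - 1 : Nat) = best - 1 := by omega
      rw [e1] at this
      rw [this]
    · have hz0 : z ≠ 0 := by omega
      have eL : pvStepB (pvStepB (z, cur - 1, best - 1) '1') '0'
          = (z + 1, max (cur - 1 + 1) z, max (best - 1) (max (cur - 1 + 1) z)) := by
        simp [pvStepB, hz0]
      have eR : pvStepB (pvStepB (z, cur, best) '0') '1'
          = (z + 1, max (cur + 1) (z + 1), max best (max (cur + 1) (z + 1))) := by
        simp [pvStepB]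
      rw [eL, eR]
      have e2 : (max (best - 1) (max (cur - 1 + 1) z) : Nat)
          = max best (max (cur + 1) (z + 1)) - 1 := by omega
      have e1 : (max (cur - 1 + 1) z : Nat) = max (cur + 1) (z + 1) - 1 := by omega
      rw [e2, e1]
      exact ih (z + 1) (max (cur + 1) (z + 1)) (max best (max (cur + 1) (z + 1)))
        (by omega) (Or.inl (by omega))
  | case2 a b r h ih =>
    intro z cur best hzc hinv
    rw [pvPassA_nonswap a b r h]
    simp only [List.foldl_cons]
    rcases Decidable.em (a = '0') with h0 | h0
    · subst h0
      have hb1 : b ≠ '1' := fun hb => h ⟨rfl, hb⟩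
      rw [pvStepB_zero, pvStepB_zero]
      exact ih (z + 1) cur best (by omega) (Or.inr (by simp [hb1]))
    · rcases Decidable.em (a = '1') with h1 | h1
      · subst h1
        have hzle : z ≤ cur := by
          rcases hinv with h' | h'
          · exact h'
          · exact absurd (by simp) h'
        rcases Nat.eq_zero_or_pos z with hz | hz
        · subst hz
          have hcur := hzc rfl; subst hcur
          rw [pvStepB_one, pvStepB_one]
          simp only [reduceIte]
          simpa using ih 0 0 best (fun _ => rfl) (Or.inl (le_refl 0))
        · have hz0 : z ≠ 0 := by omega
          rw [pvStepB_one, pvStepB_one]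
          simp only [if_neg hz0]
          have e2 : (max (best - 1) (max (cur - 1 + 1) z) : Nat)
              = max best (max (cur + 1) z) - 1 := by omega
          have e1 : (max (cur - 1 + 1) z : Nat) = max (cur + 1) z - 1 := by omega
          rw [e2, e1]
          exact ih z (max (cur + 1) z) (max best (max (cur + 1) z))
            (by omega) (Or.inl (by omega))
      · rw [pvStepB_other a h0 h1, pvStepB_other a h0 h1]
        exact ih 0 0 best (fun _ => rfl) (Or.inl (le_refl 0))
  | case3 l h =>
    intro z cur best hzc hinv
    match l, h with
    | [], _ => simp [pvPassA]
    | [c], _ =>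
      have hp : pvPassA [c] = ([c], 0) := by simp [pvPassA]
      rw [hp]
      simp only [List.foldl_cons, List.foldl_nil]
      rcases Decidable.em (c = '0') with h0 | h0
      · subst h0; rw [pvStepB_zero, pvStepB_zero]
      · rcases Decidable.em (c = '1') with h1 | h1
        · subst h1
          have hzle : z ≤ cur := by
            rcases hinv with h' | h'
            · exact h'
            · exact absurd (by simp) h'
          rcases Nat.eq_zero_or_pos z with hz | hz
          · subst hz
            have hcur := hzc rfl; subst hcur
            rw [pvStepB_one, pvStepB_one]
            simp
          · have hz0 : z ≠ 0 := by omega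
            rw [pvStepB_one, pvStepB_one]
            simp only [if_neg hz0]
            omega
        · rw [pvStepB_other c h0 h1, pvStepB_other c h0 h1]
    | a :: b :: r, h => exact (h a b r rfl).elim

-- A's outer loop computes B's one-pass answer
theorem pvOuterA_eq (l : List Char) :
    pvOuterA l = ((List.foldl pvStepB (0, 0, 0) l).2.2 : Int) := by
  induction l using pvOuterA.induct with
  | case1 l hc =>
    rw [pvOuterA, dif_pos hc]
    have := pvB_zero l hc 0 0 0 (fun _ => rfl)
    simp [this]
  | case2 l hc ih =>
    rw [pvOuterA, dif_neg hc, ih]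
    have hdec := pvB_dec l 0 0 0 (fun _ => rfl) (Or.inl (le_refl 0))
    rw [hdec]
    have hpos := pvB_pos l hc (0, 0, 0)
    omega

-- ===== VERDICT (by name: the statement is the Claim_ definition above) =====
theorem secondsToRemoveOccurrences_spec : Claim_equal_secondsToRemoveOccurrences := by
  intro s _
  unfold Spec_secondsToRemoveOccurrences secondsToRemoveOccurrences secondsToRemoveOccurrences_alt
  exact pvOuterA_eq s.toList
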